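-- pv_equiv track=rewrite | github.com/decisionenabler-sk/python-de-practice | content_data_analytics.py | find_user_device_switch
-- ===== SOURCE A (Python) =====
-- from collections import defaultdict
--
-- def find_user_device_switch(weekly_primary_device):
--     # first we arrage the weekly user devices as a list for each user
--     user_devices = defaultdict(list)
--     output = defaultdict(int)
--     for week in weekly_primary_device:
--         for user, device in week.items():
--             user_devices[user].append(device)
--     # Then we can compare previous and current devices in the list to count the switches
--     for user, devices in user_devices.items():
--         switches = 0
--         for i in range(1, len(devices)):
--             # when the current week device is not equal to previous device
--             if devices[i] != devices[i-1]:
--                 switches += 1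
--         output[user] = switches
--     return dict(output)
-- ===== SOURCE B (Python) =====
-- def find_user_device_switch(weekly_primary_device):
--     # Single pass over the weeks: track each user's last seen device and a running
--     # switch count, instead of materialising per-user device lists first.
--     last_device = {}
--     counts = {}
--     for week in weekly_primary_device:
--         for user, device in week.items():
--             if user not in counts:
--                 counts[user] = 0
--             elif last_device[user] != device:
--                 counts[user] += 1
--             last_device[user] = device
--     return counts
-- ===== Notes on version B (the rewrite author's own statement) =====
-- stated objective: simpler
-- what changed: Fuses A's two phases (build per-user device lists, then count adjacent changes per list) into a single pass over the weeks that keeps only each user's last device and a running switch counter, dropping the per-user lists entirely.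
import Mathlib
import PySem

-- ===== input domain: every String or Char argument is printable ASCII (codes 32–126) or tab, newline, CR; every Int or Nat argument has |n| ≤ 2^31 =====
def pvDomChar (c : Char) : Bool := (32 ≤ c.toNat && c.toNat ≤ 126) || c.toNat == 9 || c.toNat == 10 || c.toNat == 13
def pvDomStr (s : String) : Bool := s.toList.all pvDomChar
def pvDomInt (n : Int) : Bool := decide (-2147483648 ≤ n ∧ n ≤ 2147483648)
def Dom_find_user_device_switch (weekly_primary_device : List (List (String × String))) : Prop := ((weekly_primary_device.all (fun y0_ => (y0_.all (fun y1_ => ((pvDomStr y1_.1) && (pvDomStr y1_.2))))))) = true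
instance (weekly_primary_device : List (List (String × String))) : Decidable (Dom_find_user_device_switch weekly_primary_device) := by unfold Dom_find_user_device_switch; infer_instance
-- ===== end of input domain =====

-- B replaces A's two phases (collect each user's full device list, then count adjacent changes)
-- by one pass that tracks only each user's last device and a running switch count (objective: simpler).

-- ===== PORT A =====
def find_user_device_switch (weekly_primary_device : List (List (String × String))) : List (String × Int) :=
  -- user_devices = defaultdict(list); for week ...: for user, device in week.items(): user_devices[user].append(device)
  let user_devices : PySem.Dict String (List String) :=
    weekly_primary_device.foldl
      (fun ud week => week.foldl (fun ud p => ud.modify p.1 [] (fun ds => ds ++ [p.2])) ud)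
      PySem.Dict.empty
  -- output = defaultdict(int); for user, devices ...: switches loop; output[user] = switches; return dict(output)
  let output : PySem.Dict String Int :=
    user_devices.items.foldl
      (fun out q =>
        let switches : Int :=
          (PySem.List.pyRange 1 (PySem.List.len q.2)).foldl
            (fun s i =>
              -- devices[i], devices[i-1]: every i in range(1, len(devices)) is in range, so pyGetD is exact
              if PySem.List.pyGetD q.2 i "" ≠ PySem.List.pyGetD q.2 (i - 1) "" then s + 1 else s)
            0
        out.insert q.1 switches)
      PySem.Dict.empty
  output.items

-- ===== PORT B =====
def find_user_device_switch_alt (weekly_primary_device : List (List (String × String))) : List (String × Int) :=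
  -- state = (last_device, counts); one pass over every (user, device) in week order
  let st :=
    weekly_primary_device.foldl
      (fun st week =>
        week.foldl
          (fun (st : PySem.Dict String String × PySem.Dict String Int) p =>
            let counts :=
              if st.2.contains p.1 = false then st.2.insert p.1 0
              -- last_device[user]: read only when the user was seen before, so getD is exact
              else if st.1.getD p.1 "" ≠ p.2 then st.2.modify p.1 0 (fun c => c + 1)
              else st.2
            (st.1.insert p.1 p.2, counts))
          st)
      ((PySem.Dict.empty : PySem.Dict String String), (PySem.Dict.empty : PySem.Dict String Int))
  st.2.items

-- ===== PRECONDITION & SPEC =====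
def Spec_find_user_device_switch (weekly_primary_device : List (List (String × String))) (out : List (String × Int)) : Prop := out = find_user_device_switch_alt weekly_primary_device
instance (weekly_primary_device : List (List (String × String))) (out : List (String × Int)) : Decidable (Spec_find_user_device_switch weekly_primary_device out) := by unfold Spec_find_user_device_switch; infer_instance

-- ===== CLAIM (what is proved, stated in full; the proofs are below) =====
def Claim_equal_find_user_device_switch : Prop := ∀ (weekly_primary_device : List (List (String × String))), Dom_find_user_device_switch weekly_primary_device → Spec_find_user_device_switch weekly_primary_device (find_user_device_switch weekly_primary_device)

-- ===== LEMMAS AND PROOFS =====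

-- A's phase-1 step and B's step, as named functions (definitionally the ports' lambdas)
def pvAStep (ud : PySem.Dict String (List String)) (p : String × String) : PySem.Dict String (List String) :=
  ud.modify p.1 [] (fun ds => ds ++ [p.2])

def pvBStep (st : PySem.Dict String String × PySem.Dict String Int) (p : String × String) :
    PySem.Dict String String × PySem.Dict String Int :=
  let counts :=
    if st.2.contains p.1 = false then st.2.insert p.1 0
    else if st.1.getD p.1 "" ≠ p.2 then st.2.modify p.1 0 (fun c => c + 1)
    else st.2
  (st.1.insert p.1 p.2, counts)

-- A's inner switches loop, as a function of the device list
def pvSwA (ds : List String) : Int :=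
  (PySem.List.pyRange 1 (PySem.List.len ds)).foldl
    (fun s i => if PySem.List.pyGetD ds i "" ≠ PySem.List.pyGetD ds (i - 1) "" then s + 1 else s) 0

-- number of adjacent changes, structurally
def pvInc : List String → Int
  | [] => 0
  | [_] => 0
  | a :: b :: t => (if b ≠ a then 1 else 0) + pvInc (b :: t)

lemma pvInc_concat (ds : List String) (a d : String) :
    pvInc (a :: ds ++ [d]) = pvInc (a :: ds) + (if some d ≠ (a :: ds).getLast? then 1 else 0) := by
  induction ds generalizing a with
  | nil => simp [pvInc]
  | cons b t ih =>
      rw [show (a :: (b :: t)) ++ [d] = a :: ((b :: t) ++ [d]) from rfl,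
          show pvInc (a :: ((b :: t) ++ [d])) = (if b ≠ a then 1 else 0) + pvInc ((b :: t) ++ [d]) from rfl]
      rw [ih b,
          show pvInc (a :: b :: t) = (if b ≠ a then 1 else 0) + pvInc (b :: t) from rfl,
          List.getLast?_cons_cons]
      omega

lemma pvInc_concat' (ds : List String) (d : String) (h : ds ≠ []) :
    pvInc (ds ++ [d]) = pvInc ds + (if some d ≠ ds.getLast? then 1 else 0) := by
  cases ds with
  | nil => exact absurd rfl h
  | cons a t => exact pvInc_concat t a d

lemma pvSwA_concat (ds : List String) (d : String) (h : ds ≠ []) :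
    pvSwA (ds ++ [d]) = pvSwA ds + (if some d ≠ ds.getLast? then 1 else 0) := by
  have hn : 1 ≤ (ds.length : Int) := by
    have := List.length_pos_iff.mpr h; omega
  have hlen : PySem.List.len (ds ++ [d]) = (ds.length : Int) + 1 := by
    simp [PySem.List.len_eq]
  have hrange : PySem.List.pyRange 1 ((ds.length : Int) + 1) =
      PySem.List.pyRange 1 (ds.length : Int) ++ [(ds.length : Int)] :=
    PySem.List.pyRange_one_succ_right hn
  unfold pvSwA
  rw [hlen, hrange, List.foldl_append, PySem.List.len_eq]
  -- prefix fold: indices stay inside ds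
  have hpref : ∀ (init : Int),
      (PySem.List.pyRange 1 (ds.length : Int)).foldl
        (fun s i => if PySem.List.pyGetD (ds ++ [d]) i "" ≠ PySem.List.pyGetD (ds ++ [d]) (i - 1) "" then s + 1 else s) init
      = (PySem.List.pyRange 1 (ds.length : Int)).foldl
        (fun s i => if PySem.List.pyGetD ds i "" ≠ PySem.List.pyGetD ds (i - 1) "" then s + 1 else s) init := by
    intro init
    apply PySem.List.foldl_congr_mem
    intro acc i hi
    rw [PySem.List.mem_pyRange_one] at hi
    have hget : ∀ (j : Int), 0 ≤ j → j < (ds.length : Int) →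
        PySem.List.pyGetD (ds ++ [d]) j "" = PySem.List.pyGetD ds j "" := by
      intro j h0 h1
      rw [PySem.List.pyGetD_eq_getElem _ _ h0 (by simp; omega),
          PySem.List.pyGetD_eq_getElem _ _ h0 (by omega)]
      exact List.getElem_append_left (by omega)
    rw [hget i (by omega) hi.2, hget (i - 1) (by omega) (by omega)]
  rw [hpref]
  -- last step: compares d with ds.getLast
  have hd : PySem.List.pyGetD (ds ++ [d]) (ds.length : Int) "" = d := by
    rw [PySem.List.pyGetD_eq_getElem _ _ (by omega) (by simp)]
    simp
  have hlast : PySem.List.pyGetD (ds ++ [d]) ((ds.length : Int) - 1) "" = ds.getLast h := by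
    rw [PySem.List.pyGetD_eq_getElem _ _ (by omega)
        (by simp only [List.length_append, List.length_cons, List.length_nil]; push_cast; omega)]
    have hidx : ((ds.length : Int) - 1).toNat = ds.length - 1 := by omega
    simp only [hidx]
    rw [List.getElem_append_left (by omega)]
    exact (List.getLast_eq_getElem h).symm
  simp only [List.foldl_cons, List.foldl_nil]
  rw [hd, hlast]
  rw [List.getLast?_eq_some_getLast h]
  by_cases hc : d = ds.getLast h
  · simp [hc]
  · simp [hc]

lemma pvSwA_eq_pvInc (ds : List String) : pvSwA ds = pvInc ds := by
  induction ds using List.reverseRecOn with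
  | nil => rfl
  | append_singleton ds d ih =>
      cases hds : ds with
      | nil => rfl
      | cons a t =>
          rw [← hds, pvSwA_concat ds d (by rw [hds]; simp), ih,
              pvInc_concat' ds d (by rw [hds]; simp)]

-- the invariant between A's phase-1 dict and B's state, after any prefix of (user, device) pairs
lemma pvInvariant (ps : List (String × String)) :
    (ps.foldl pvAStep PySem.Dict.empty).keys.Nodup ∧
    (∀ q ∈ (ps.foldl pvAStep PySem.Dict.empty).items, q.2 ≠ []) ∧
    (∀ u, (ps.foldl pvBStep (PySem.Dict.empty, PySem.Dict.empty)).1.get? u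
        = ((ps.foldl pvAStep PySem.Dict.empty).getD u []).getLast?) ∧
    (ps.foldl pvBStep (PySem.Dict.empty, PySem.Dict.empty)).2.items
      = (ps.foldl pvAStep PySem.Dict.empty).items.map (fun q => (q.1, pvInc q.2)) := by
  induction ps using List.reverseRecOn with
  | nil =>
      refine ⟨by simp [PySem.Dict.empty], by simp [PySem.Dict.empty], ?_, by simp [PySem.Dict.empty]⟩
      intro u; simp [PySem.Dict.empty, PySem.Dict.get?, PySem.Dict.getD]
  | append_singleton ps p ih =>
      obtain ⟨h1, h2, h3, h4⟩ := ih
      simp only [List.foldl_append, List.foldl_cons, List.foldl_nil]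
      set ud := ps.foldl pvAStep PySem.Dict.empty with hud
      set st := ps.foldl pvBStep (PySem.Dict.empty, PySem.Dict.empty) with hst
      obtain ⟨u, d⟩ := p
      -- counts and user_devices always share keys (h4)
      have hkeys : st.2.keys = ud.keys := by
        simp [PySem.Dict.keys, h4]
      have hcsame : ∀ v, st.2.contains v = ud.contains v := by
        intro v
        rw [PySem.Dict.contains, PySem.Dict.contains, h4, List.any_map]
        rfl
      have hAstep : pvAStep ud (u, d) = ud.insert u (ud.getD u [] ++ [d]) := rfl
      by_cases hc : ud.contains u = true
      · -- user already seen: ds0 is their device list so far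
        obtain ⟨ds0, hget⟩ : ∃ v, ud.get? u = some v := by
          cases hgu : ud.get? u with
          | none => rw [PySem.Dict.get?_eq_none_iff_contains] at hgu; rw [hc] at hgu; cases hgu
          | some v => exact ⟨v, rfl⟩
        have hgetD : ud.getD u [] = ds0 := by simp [PySem.Dict.getD, hget]
        have hmem : (u, ds0) ∈ ud.items := PySem.Dict.mem_items_of_get?_eq_some ud hget
        have hds0 : ds0 ≠ [] := h2 _ hmem
        have hlastu : st.1.get? u = some (ds0.getLast hds0) := by
          rw [h3 u, hgetD, List.getLast?_eq_some_getLast hds0]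
        have hlastD : st.1.getD u "" = ds0.getLast hds0 := by
          simp [PySem.Dict.getD, hlastu]
        have hcB : st.2.contains u = true := by rw [hcsame]; exact hc
        have hitemsA : (pvAStep ud (u, d)).items
            = ud.items.map (fun q => if q.1 == u then (u, ds0 ++ [d]) else q) := by
          rw [hAstep, hgetD]
          exact PySem.Dict.items_insert_of_contains ud _ hc
        have hvals : ∀ q ∈ ud.items, q.1 = u → q.2 = ds0 := by
          intro q hq hq1
          have := PySem.Dict.getD_of_mem_items ud (k := q.1) (v := q.2) hq h1 []
          rw [hq1, hgetD] at this; exact this.symm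
        have hcntD : st.2.getD u 0 = pvInc ds0 := by
          have : (u, pvInc ds0) ∈ st.2.items := by
            rw [h4]; exact List.mem_map_of_mem hmem
          exact PySem.Dict.getD_of_mem_items st.2 this (by rw [hkeys]; exact h1) 0
        refine ⟨?_, ?_, ?_, ?_⟩
        · rw [hAstep]
          exact PySem.Dict.nodup_keys_insert _ _ _ h1
        · intro q hq
          rw [hitemsA] at hq
          obtain ⟨r, hr, hrq⟩ := List.mem_map.mp hq
          by_cases hru : r.1 = u
          · simp only [hru, BEq.rfl, if_pos] at hrq
            simp [← hrq]
          · rw [if_neg (by simp [hru])] at hrq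
            rw [← hrq]; exact h2 r hr
        · intro v
          simp only [pvBStep]
          by_cases hv : v = u
          · subst hv
            rw [PySem.Dict.get?_insert_self, hAstep, PySem.Dict.getD_insert_self, hgetD]
            simp
          · rw [PySem.Dict.get?_insert_of_ne _ _ hv, hAstep,
                PySem.Dict.getD_insert_of_ne _ _ _ hv, h3 v]
        · simp only [pvBStep]
          rw [if_neg (by simp [hcB])]
          rw [hitemsA, List.map_map]
          by_cases hne : st.1.getD u "" ≠ d
          · rw [if_pos hne]
            have : st.2.modify u 0 (fun c => c + 1) = st.2.insert u (pvInc ds0 + 1) := by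
              simp [PySem.Dict.modify, hcntD]
            rw [this, PySem.Dict.items_insert_of_contains _ _ hcB, h4, List.map_map]
            apply List.map_congr_left
            intro q hq
            by_cases hqu : q.1 = u
            · have hq2 : q.2 = ds0 := hvals q hq hqu
              simp [Function.comp, hqu, pvInc_concat' ds0 d hds0]
              rw [List.getLast?_eq_some_getLast hds0]
              intro hcon
              exact hne (by rw [hlastD]; exact (Option.some_inj.mp hcon).symm)
            · simp [Function.comp, hqu]
          · rw [if_neg hne]
            simp only [ne_eq, not_not] at hne
            rw [h4]
            apply List.map_congr_left
            intro q hq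
            by_cases hqu : q.1 = u
            · have hq2 : q.2 = ds0 := hvals q hq hqu
              simp [Function.comp, hqu, hq2, pvInc_concat' ds0 d hds0]
              rw [List.getLast?_eq_some_getLast hds0, ← hlastD, hne]
            · simp [Function.comp, hqu]
      · -- first appearance of u
        have hc' : ud.contains u = false := by simpa using hc
        have hcB : st.2.contains u = false := by rw [hcsame]; exact hc'
        have hgetD : ud.getD u [] = [] := PySem.Dict.getD_of_not_contains ud [] hc'
        have hitemsA : (pvAStep ud (u, d)).items = ud.items ++ [(u, [d])] := by
          rw [hAstep, hgetD]
          exact PySem.Dict.items_insert_of_not_contains ud _ hc'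
        refine ⟨?_, ?_, ?_, ?_⟩
        · rw [hAstep]; exact PySem.Dict.nodup_keys_insert _ _ _ h1
        · intro q hq
          rw [hitemsA] at hq
          rcases List.mem_append.mp hq with hq | hq
          · exact h2 q hq
          · simp at hq; simp [hq]
        · intro v
          simp only [pvBStep]
          by_cases hv : v = u
          · subst hv
            rw [PySem.Dict.get?_insert_self, hAstep, PySem.Dict.getD_insert_self, hgetD]
            simp
          · rw [PySem.Dict.get?_insert_of_ne _ _ hv, hAstep,
                PySem.Dict.getD_insert_of_ne _ _ _ hv, h3 v]
        · simp only [pvBStep]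
          rw [if_pos hcB]
          rw [PySem.Dict.items_insert_of_not_contains _ _ hcB, hitemsA, h4, List.map_append]
          simp [pvInc]

-- folding fresh-key inserts into a dict appends the mapped items
lemma pvOutFold (l : List (String × List String)) (acc : PySem.Dict String Int)
    (hd : ∀ q ∈ l, acc.contains q.1 = false) (hn : (l.map (fun q => q.1)).Nodup) :
    (l.foldl (fun out q => out.insert q.1 (pvSwA q.2)) acc).items
      = acc.items ++ l.map (fun q => (q.1, pvSwA q.2)) := by
  induction l generalizing acc with
  | nil => simp
  | cons q t ih =>
      simp only [List.foldl_cons]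
      rw [ih]
      · rw [PySem.Dict.items_insert_of_not_contains _ _ (hd q (by simp))]
        simp
      · intro r hr
        rw [PySem.Dict.contains_insert]
        simp only [List.map, List.nodup_cons] at hn
        have : r.1 ≠ q.1 := by
          intro h; exact hn.1 (h ▸ List.mem_map_of_mem hr)
        simp [this, hd r (List.mem_cons_of_mem _ hr)]
      · exact (List.nodup_cons.mp (by simpa using hn)).2

-- ===== VERDICT (by name: the statement is the Claim_ definition above) =====
theorem find_user_device_switch_spec : Claim_equal_find_user_device_switch := by
  intro w _
  unfold Spec_find_user_device_switch find_user_device_switch find_user_device_switch_alt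
  have hflatA :
      w.foldl (fun ud week => week.foldl (fun ud p => ud.modify p.1 [] (fun ds => ds ++ [p.2])) ud) PySem.Dict.empty
        = w.flatten.foldl pvAStep PySem.Dict.empty := by
    rw [List.foldl_flatten]; rfl
  have hflatB :
      w.foldl (fun st week => week.foldl
          (fun (st : PySem.Dict String String × PySem.Dict String Int) p =>
            let counts :=
              if st.2.contains p.1 = false then st.2.insert p.1 0
              else if st.1.getD p.1 "" ≠ p.2 then st.2.modify p.1 0 (fun c => c + 1)
              else st.2
            (st.1.insert p.1 p.2, counts)) st)
        ((PySem.Dict.empty : PySem.Dict String String), (PySem.Dict.empty : PySem.Dict String Int))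
        = w.flatten.foldl pvBStep (PySem.Dict.empty, PySem.Dict.empty) := by
    rw [List.foldl_flatten]; rfl
  simp only [hflatA, hflatB]
  obtain ⟨hnodup, -, -, hitems⟩ := pvInvariant w.flatten
  rw [hitems]
  show (List.foldl (fun (out : PySem.Dict String Int) (q : String × List String) =>
          out.insert q.1 (pvSwA q.2)) PySem.Dict.empty
        (List.foldl pvAStep PySem.Dict.empty w.flatten).items).items
      = List.map (fun q => (q.1, pvInc q.2)) (List.foldl pvAStep PySem.Dict.empty w.flatten).items
  rw [pvOutFold _ PySem.Dict.empty (fun q _ => PySem.Dict.contains_empty q.1) hnodup]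
  rw [show (PySem.Dict.empty : PySem.Dict String Int).items = [] from rfl, List.nil_append]
  exact (List.map_congr_left (fun q _ => by rw [pvSwA_eq_pvInc])).symm
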